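-- pv_equiv track=rewrite | github.com/alankrit03/Problem_Solving | water_prob.py | next_stop
-- ===== SOURCE A (Python) =====
-- def next_stop(arr,current):
--     curr_height=arr[current]
--     next_max=arr[current+1]
--     pos=current+1
--     for i in range(current+1,len(arr)):
--         if arr[i]>=curr_height:
--             return i,min(curr_height,arr[i])
--         elif arr[i]>=next_max:
--             next_max=arr[i]
--             pos=i
--     return pos,next_max
-- ===== SOURCE B (Python) =====
-- def next_stop(arr, current):
--     curr_height = arr[current]
--     idxs = range(current + 1, len(arr))
--     # pass 1: first index at or above the current height
--     for i in idxs: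
--         if arr[i] >= curr_height:
--             return i, curr_height
--     # pass 2: argmax by (value, index) -> last occurrence of the maximum
--     pos = max(idxs, key=lambda i: (arr[i], i))
--     return pos, arr[pos]
-- ===== Notes on version B (the rewrite author's own statement) =====
-- stated objective: simpler
-- what changed: A's single stateful loop with early return and two tracked variables is replaced by two independent passes: a plain first-match search (returning the height directly, since min(curr_height, arr[i]) is curr_height there), and only if it fails an argmax over the range keyed by (value, index), which reproduces the last-occurrence tie-break.
import Mathlib
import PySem

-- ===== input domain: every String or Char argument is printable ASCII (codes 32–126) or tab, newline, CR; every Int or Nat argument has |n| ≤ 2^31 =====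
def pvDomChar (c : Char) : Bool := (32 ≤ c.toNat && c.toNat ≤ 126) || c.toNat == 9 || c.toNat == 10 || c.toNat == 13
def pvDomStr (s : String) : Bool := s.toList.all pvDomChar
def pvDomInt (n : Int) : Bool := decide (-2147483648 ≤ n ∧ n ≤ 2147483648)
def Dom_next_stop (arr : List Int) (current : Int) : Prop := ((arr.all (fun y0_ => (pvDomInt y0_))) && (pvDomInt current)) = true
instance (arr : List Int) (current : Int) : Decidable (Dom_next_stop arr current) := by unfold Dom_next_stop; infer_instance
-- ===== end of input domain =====

-- B replaces A's single stateful loop with an early return by two independent passes: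
-- a plain first-match search, then (only if it fails) an argmax by (value, index); simpler decomposition, same cost.

-- ===== PORT A =====
-- A's single for-loop: early return on arr[i] >= curr_height, else track (pos, next_max).
def nextStopLoopA (arr : List Int) (ch : Int) : List Int → Int → Int → Int × Int
  | [], pos, nm => (pos, nm)
  | i :: rest, pos, nm =>
    let a := PySem.List.pyGetD arr i 0
    if a ≥ ch then (i, min ch a)
    else if a ≥ nm then nextStopLoopA arr ch rest i a
    else nextStopLoopA arr ch rest pos nm

def next_stop (arr : List Int) (current : Int) : Int × Int :=
  let curr_height := PySem.List.pyGetD arr current 0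
  let next_max := PySem.List.pyGetD arr (current + 1) 0
  let pos := current + 1
  nextStopLoopA arr curr_height (PySem.List.pyRange (current + 1) arr.length 1) pos next_max

-- ===== PORT B =====
-- pass 1: first index at or above the current height
def nextStopFind (arr : List Int) (ch : Int) : List Int → Option (Int × Int)
  | [] => none
  | i :: rest =>
    if PySem.List.pyGetD arr i 0 ≥ ch then some (i, ch) else nextStopFind arr ch rest

-- one step of Python's max(idxs, key=lambda i: (arr[i], i)): keep the candidate with the
-- lexicographically larger key; the tuple comparison is spelled out (keys are distinct, so
-- Python's first-maximum rule and this strict comparison agree exactly).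
def nextStopKeyStep (arr : List Int) (b i : Int) : Int :=
  if PySem.List.pyGetD arr i 0 > PySem.List.pyGetD arr b 0 ∨
     (PySem.List.pyGetD arr i 0 = PySem.List.pyGetD arr b 0 ∧ i > b) then i else b

-- max(idxs, key=...): Python raises ValueError on an empty range; that input is outside
-- Pre_, the [] branch's value 0 is never claimed about.
def nextStopArgmax (arr : List Int) : List Int → Int
  | [] => 0
  | j :: rest => rest.foldl (nextStopKeyStep arr) j

def next_stop_alt (arr : List Int) (current : Int) : Int × Int :=
  let curr_height := PySem.List.pyGetD arr current 0
  let idxs := PySem.List.pyRange (current + 1) arr.length 1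
  match nextStopFind arr curr_height idxs with
  | some p => p
  | none =>
    let pos := nextStopArgmax arr idxs
    (pos, PySem.List.pyGetD arr pos 0)

-- ===== PRECONDITION & SPEC =====
-- Pre_: exactly where Python A returns (arr[current] and arr[current+1] do not raise IndexError).
def Pre_next_stop (arr : List Int) (current : Int) : Prop :=
  PySem.Raise.InRange arr.length current ∧ PySem.Raise.InRange arr.length (current + 1)
instance (arr : List Int) (current : Int) : Decidable (Pre_next_stop arr current) := by
  unfold Pre_next_stop; infer_instance
def pvWitness_next_stop : List Int × Int := ([3, 1, 2], 0)

def Spec_next_stop (arr : List Int) (current : Int) (out : Int × Int) : Prop := out = next_stop_alt arr current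
instance (arr : List Int) (current : Int) (out : Int × Int) : Decidable (Spec_next_stop arr current out) := by unfold Spec_next_stop; infer_instance

-- ===== CLAIM (what is proved, stated in full; the proofs are below) =====
def Claim_equal_next_stop : Prop := ∀ (arr : List Int) (current : Int), Dom_next_stop arr current → Pre_next_stop arr current → Spec_next_stop arr current (next_stop arr current)

-- ===== LEMMAS AND PROOFS =====

-- A's running-max state step, extracted for the proofs below.
def nextStopMaxStep (arr : List Int) (st : Int × Int) (i : Int) : Int × Int :=
  if PySem.List.pyGetD arr i 0 ≥ st.2 then (i, PySem.List.pyGetD arr i 0) else st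

-- A's loop equals: first match of pass 1 if any, else the running-max fold from the same state.
theorem nextStopLoop_eq (arr : List Int) (ch : Int) (l : List Int) :
    ∀ pos nm, nextStopLoopA arr ch l pos nm =
      match nextStopFind arr ch l with
      | some p => p
      | none => l.foldl (nextStopMaxStep arr) (pos, nm) := by
  induction l with
  | nil => intro pos nm; simp [nextStopLoopA, nextStopFind]
  | cons i rest ih =>
    intro pos nm
    simp only [nextStopLoopA, nextStopFind, List.foldl, nextStopMaxStep]
    by_cases h1 : PySem.List.pyGetD arr i 0 ≥ ch
    · simp [h1]
    · by_cases h2 : PySem.List.pyGetD arr i 0 ≥ nm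
      · simp [h1, h2, ih]
      · simp [h1, h2, ih]

-- Invariant: when the state is (p, arr[p]) and every remaining index exceeds p, the
-- running-max fold tracks exactly the lexicographic argmax fold.
theorem foldl_maxStep_eq_argmax (arr : List Int) (l : List Int) :
    ∀ p, (∀ i ∈ l, p < i) → l.Pairwise (· < ·) →
      l.foldl (nextStopMaxStep arr) (p, PySem.List.pyGetD arr p 0) =
        (l.foldl (nextStopKeyStep arr) p,
         PySem.List.pyGetD arr (l.foldl (nextStopKeyStep arr) p) 0) := by
  induction l with
  | nil => intro p _ _; simp
  | cons i rest ih =>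
    intro p hlt hpw
    have hpi : p < i := hlt i (by simp)
    have hrest : ∀ j ∈ rest, i < j := (List.pairwise_cons.mp hpw).1
    have hpw' := (List.pairwise_cons.mp hpw).2
    simp only [List.foldl, nextStopMaxStep, nextStopKeyStep]
    by_cases h : PySem.List.pyGetD arr i 0 ≥ PySem.List.pyGetD arr p 0
    · have hcond : PySem.List.pyGetD arr i 0 > PySem.List.pyGetD arr p 0 ∨
        (PySem.List.pyGetD arr i 0 = PySem.List.pyGetD arr p 0 ∧ i > p) := by
        rcases lt_or_eq_of_le h with h' | h'
        · exact Or.inl h'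
        · exact Or.inr ⟨h'.symm, hpi⟩
      simp only [if_pos h, if_pos hcond]
      exact ih i hrest hpw'
    · have hcond : ¬ (PySem.List.pyGetD arr i 0 > PySem.List.pyGetD arr p 0 ∨
        (PySem.List.pyGetD arr i 0 = PySem.List.pyGetD arr p 0 ∧ i > p)) := by
        intro hc
        rcases hc with h' | ⟨h', _⟩ <;> omega
      simp only [if_neg h, if_neg hcond]
      exact ih p (fun j hj => lt_trans hpi (hrest j hj)) hpw'

-- ===== VERDICT (by name: the statement is the Claim_ definition above) =====
theorem next_stop_spec : Claim_equal_next_stop := by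
  intro arr current _ hpre
  unfold Spec_next_stop next_stop next_stop_alt
  rw [nextStopLoop_eq]
  -- under Pre_, the range is nonempty: current + 1 < arr.length
  have hlt : current + 1 < (arr.length : Int) := by
    have := hpre.2
    simp [PySem.Raise.InRange] at this
    omega
  have hcons : PySem.List.pyRange (current + 1) arr.length 1 =
      (current + 1) :: PySem.List.pyRange (current + 1 + 1) arr.length 1 :=
    PySem.List.pyRange_one_cons hlt
  cases hf : nextStopFind arr (PySem.List.pyGetD arr current 0)
      (PySem.List.pyRange (current + 1) arr.length 1) with
  | some p => simp [hf]
  | none =>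
    simp only [hf]
    rw [hcons]
    simp only [List.foldl, nextStopArgmax, nextStopMaxStep, le_refl, ite_true]
    exact foldl_maxStep_eq_argmax arr _ (current + 1)
      (fun j hj => by
        have := (PySem.List.mem_pyRange_one (a := current + 1 + 1) (b := (arr.length : Int)) (x := j)).mp hj
        omega)
      (PySem.List.pairwise_lt_pyRange_one _ _)
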